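-- pv_equiv track=rewrite | github.com/inbarkarmy/ProjectNetflix | Neighbors.py | caculateVecDistance
-- ===== SOURCE A (Python) =====
-- maxDist = 4
--
-- def caculateVecDistance(binaryVec1, binaryVec2 ):
--     dist=maxDist
--     if len(binaryVec1)==len(binaryVec2):
--         for i in range(len(binaryVec1)):
--             if binaryVec1[i]==binaryVec2[i]:
--                 if binaryVec2[i]==1:
--                     dist=dist-1
--     return dist
-- ===== SOURCE B (Python) =====
-- maxDist = 4
--
-- def caculateVecDistance(binaryVec1, binaryVec2):
--     if len(binaryVec1) != len(binaryVec2):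
--         return maxDist
--     s1 = {i for i, v in enumerate(binaryVec1) if v == 1}
--     s2 = {i for i, v in enumerate(binaryVec2) if v == 1}
--     return maxDist - len(s1 & s2)
-- ===== Notes on version B (the rewrite author's own statement) =====
-- stated objective: alternative
-- what changed: Replaces the single index-parallel loop that decrements a counter with two independent enumerate passes building the sets of 1-positions and a set intersection, returning 4 minus the intersection size.
import Mathlib
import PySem

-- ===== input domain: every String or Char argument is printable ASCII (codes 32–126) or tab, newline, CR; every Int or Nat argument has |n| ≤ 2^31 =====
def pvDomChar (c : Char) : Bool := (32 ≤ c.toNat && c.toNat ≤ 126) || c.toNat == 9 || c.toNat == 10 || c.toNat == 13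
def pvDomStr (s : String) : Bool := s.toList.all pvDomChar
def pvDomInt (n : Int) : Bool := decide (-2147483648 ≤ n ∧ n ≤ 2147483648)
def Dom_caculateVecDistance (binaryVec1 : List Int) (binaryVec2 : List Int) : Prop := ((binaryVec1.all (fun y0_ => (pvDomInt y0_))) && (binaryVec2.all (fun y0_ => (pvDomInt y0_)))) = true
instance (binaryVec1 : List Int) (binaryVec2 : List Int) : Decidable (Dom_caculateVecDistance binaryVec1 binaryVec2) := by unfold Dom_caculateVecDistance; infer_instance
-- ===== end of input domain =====

-- B replaces A's single index-parallel decrementing loop by two independent enumerate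
-- passes collecting the sets of 1-positions and a set intersection (objective: alternative).

-- ===== PORT A =====
-- literal port of A: dist starts at maxDist = 4; if the lengths agree, loop i over
-- range(len(binaryVec1)) and decrement dist when binaryVec1[i]==binaryVec2[i]==1.
def caculateVecDistance (binaryVec1 : List Int) (binaryVec2 : List Int) : Int :=
  let dist : Int := 4
  if PySem.List.len binaryVec1 == PySem.List.len binaryVec2 then
    (PySem.List.pyRange 0 (PySem.List.len binaryVec1) 1).foldl
      (fun dist i =>
        if PySem.List.pyGetD binaryVec1 i 0 == PySem.List.pyGetD binaryVec2 i 0 then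
          if PySem.List.pyGetD binaryVec2 i 0 == 1 then dist - 1 else dist
        else dist) dist
  else dist

-- ===== PORT B =====
-- {i for i, v in enumerate(v) if v == 1}
def pvOnes (v : List Int) : PySem.Set Int :=
  PySem.Set.ofList
    ((PySem.List.enumerate v).filterMap (fun p => if p.2 == 1 then some p.1 else none))

def caculateVecDistance_alt (binaryVec1 : List Int) (binaryVec2 : List Int) : Int :=
  if PySem.List.len binaryVec1 != PySem.List.len binaryVec2 then 4
  else 4 - PySem.Set.len (PySem.Set.inter (pvOnes binaryVec1) (pvOnes binaryVec2))

-- ===== PRECONDITION & SPEC =====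
def Spec_caculateVecDistance (binaryVec1 : List Int) (binaryVec2 : List Int) (out : Int) : Prop := out = caculateVecDistance_alt binaryVec1 binaryVec2
instance (binaryVec1 : List Int) (binaryVec2 : List Int) (out : Int) : Decidable (Spec_caculateVecDistance binaryVec1 binaryVec2 out) := by unfold Spec_caculateVecDistance; infer_instance

-- ===== CLAIM (what is proved, stated in full; the proofs are below) =====
def Claim_equal_caculateVecDistance : Prop := ∀ (binaryVec1 : List Int) (binaryVec2 : List Int), Dom_caculateVecDistance binaryVec1 binaryVec2 → Spec_caculateVecDistance binaryVec1 binaryVec2 (caculateVecDistance binaryVec1 binaryVec2)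

-- ===== LEMMAS AND PROOFS =====

-- a decrementing conditional loop computes start minus a count
theorem pv_foldl_if_sub_one (l : List Int) (p : Int → Bool) (a : Int) :
    l.foldl (fun d i => if p i then d - 1 else d) a = a - (l.countP p : Int) := by
  induction l generalizing a with
  | nil => simp
  | cons x t ih =>
    by_cases h : p x <;> simp [h, ih]; ring

theorem pv_filterMap_if (l : List Int) (p : Int → Bool) :
    l.filterMap (fun j => if p j then some j else none) = l.filter p := by
  induction l with
  | nil => rfl
  | cons x t ih => by_cases h : p x <;> simp [h, ih]

-- the set of 1-positions is the filtered index range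
theorem pv_ones_eq (v : List Int) :
    pvOnes v = (PySem.List.pyRange 0 (PySem.List.len v) 1).filter
      (fun j => PySem.List.pyGetD v j 0 == 1) := by
  unfold pvOnes
  rw [PySem.List.enumerate_eq_map_pyRange v 0, List.filterMap_map]
  have : ((fun p : Int × Int => if p.2 == 1 then some p.1 else none) ∘
      fun j => (j, PySem.List.pyGetD v j 0))
      = fun j => if PySem.List.pyGetD v j 0 == 1 then some j else none := rfl
  rw [this, pv_filterMap_if]
  exact PySem.Set.ofList_eq_self_of_nodup _
    (List.Nodup.filter _ (PySem.List.nodup_pyRange_one 0 _))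

-- ===== VERDICT (by name: the statement is the Claim_ definition above) =====
theorem caculateVecDistance_spec : Claim_equal_caculateVecDistance := by
  intro v1 v2 _
  unfold Spec_caculateVecDistance caculateVecDistance caculateVecDistance_alt
  by_cases h : PySem.List.len v1 = PySem.List.len v2
  · simp only [h, beq_self_eq_true, if_true, bne_self_eq_false, Bool.false_eq_true, if_false]
    rw [pv_ones_eq, pv_ones_eq, ← h]
    have hbody : (fun (d i : Int) =>
        if PySem.List.pyGetD v1 i 0 == PySem.List.pyGetD v2 i 0 then
          if PySem.List.pyGetD v2 i 0 == 1 then d - 1 else d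
        else d)
        = fun d i => if (PySem.List.pyGetD v1 i 0 == 1 && PySem.List.pyGetD v2 i 0 == 1)
            then d - 1 else d := by
      funext d i
      by_cases h1 : PySem.List.pyGetD v1 i 0 = 1 <;>
        by_cases h2 : PySem.List.pyGetD v2 i 0 = 1 <;>
          simp [h1, h2]
    rw [hbody, pv_foldl_if_sub_one]
    have hinter : PySem.Set.inter
        ((PySem.List.pyRange 0 (PySem.List.len v1) 1).filter (fun j => PySem.List.pyGetD v1 j 0 == 1))
        ((PySem.List.pyRange 0 (PySem.List.len v1) 1).filter (fun j => PySem.List.pyGetD v2 j 0 == 1))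
        = (PySem.List.pyRange 0 (PySem.List.len v1) 1).filter
            (fun j => PySem.List.pyGetD v1 j 0 == 1 && PySem.List.pyGetD v2 j 0 == 1) := by
      unfold PySem.Set.inter PySem.Set.contains
      rw [List.filter_filter]
      apply List.filter_congr
      intro x hx
      obtain ⟨h0, hlt⟩ := PySem.List.mem_pyRange_one.mp hx
      simp [PySem.List.len] at hlt
      simp [List.mem_filter, PySem.List.mem_pyRange_one, h0, hlt, Bool.and_comm]
      by_cases hq : PySem.List.pyGetD v2 x 0 = 1 <;> simp [hq]
    rw [hinter]
    simp [PySem.Set.len, List.countP_eq_length_filter]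
  · have h' : v1.length ≠ v2.length := by
      intro he; exact h (by simp [PySem.List.len, he])
    simp [h']
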